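-- pv_equiv track=rewrite | github.com/bilaloguz/cryptology | python/cryptology/classical/substitution/polyalphabetic/beaufort.py | _create_atbash_table
-- ===== SOURCE A (Python) =====
-- from typing import List, Optional, Tuple
--
-- def _create_atbash_table(alphabet: str) -> List[List[str]]:
--     """
--     Create Beaufort table where each row uses Atbash cipher with different offsets.
--
--     Args:
--         alphabet: The alphabet to use for the table
--
--     Returns:
--         A 2D list representing the Atbash-based Beaufort table
--     """
--     alphabet_len = len(alphabet)
--     table = []
--
--     for i in range(alphabet_len):
--         row = []
--         # Each row uses Atbash cipher with rotation by row index
--         for j in range(alphabet_len):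
--             atbash_index = (alphabet_len - 1 - j + i) % alphabet_len
--             row.append(alphabet[atbash_index])
--         table.append(row)
--
--     return table
-- ===== SOURCE B (Python) =====
-- def _create_atbash_table(alphabet):
--     """Build the Atbash-based Beaufort table as rotations of one reversed-alphabet row."""
--     base = list(reversed(alphabet))
--     n = len(base)
--     return [base[n - i:] + base[:n - i] for i in range(n)]
-- ===== Notes on version B (the rewrite author's own statement) =====
-- stated objective: simpler
-- what changed: Instead of computing each cell with per-cell modular arithmetic in nested loops, B builds the reversed alphabet once and emits each row as a slice rotation (two slices) of that base row.
import Mathlib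
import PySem

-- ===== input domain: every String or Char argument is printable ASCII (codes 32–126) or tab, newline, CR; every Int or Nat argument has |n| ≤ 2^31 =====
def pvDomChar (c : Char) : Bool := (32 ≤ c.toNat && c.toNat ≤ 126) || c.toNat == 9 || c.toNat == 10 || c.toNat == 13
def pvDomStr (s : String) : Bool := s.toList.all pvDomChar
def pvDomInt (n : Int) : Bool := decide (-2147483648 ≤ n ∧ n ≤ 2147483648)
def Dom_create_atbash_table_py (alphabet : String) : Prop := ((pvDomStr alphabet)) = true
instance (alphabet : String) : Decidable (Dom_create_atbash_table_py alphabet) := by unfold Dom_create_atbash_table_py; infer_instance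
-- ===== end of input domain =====

-- B replaces A's nested per-cell modular-arithmetic loops by one reversed base row rotated per row with slices (objective: simpler).


-- ===== PORT A =====
-- literal transliteration of _create_atbash_table: two nested for-loops appending cells/rows
def create_atbash_table_py (alphabet : String) : List (List String) :=
  let alphabet_len : Int := PySem.Str.len alphabet
  (PySem.List.pyRange 0 alphabet_len 1).foldl (fun table i =>
    let row : List String :=
      (PySem.List.pyRange 0 alphabet_len 1).foldl (fun row j =>
        let atbash_index := PySem.Int.mod (alphabet_len - 1 - j + i) alphabet_len
        row ++ [match PySem.Str.pyGet? alphabet atbash_index with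
                | some c => String.ofList [c]
                | none => ""]) []   -- the index is always in range, so the none branch is unreachable
    table ++ [row]) []

-- ===== PORT B =====
-- literal transliteration of Source B: base = list(reversed(alphabet)); each row is a slice rotation of base
def create_atbash_table_py_alt (alphabet : String) : List (List String) :=
  let base : List String := alphabet.toList.reverse.map (fun c => String.ofList [c])
  let n : Int := base.length
  (PySem.List.pyRange 0 n 1).map (fun i =>
    PySem.List.slice base (some (n - i)) none ++ PySem.List.slice base none (some (n - i)))

-- ===== PRECONDITION & SPEC =====
def Spec_create_atbash_table_py (alphabet : String) (out : List (List String)) : Prop := out = create_atbash_table_py_alt alphabet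
instance (alphabet : String) (out : List (List String)) : Decidable (Spec_create_atbash_table_py alphabet out) := by unfold Spec_create_atbash_table_py; infer_instance

-- ===== CLAIM (what is proved, stated in full; the proofs are below) =====
def Claim_equal_create_atbash_table_py : Prop := ∀ (alphabet : String), Dom_create_atbash_table_py alphabet → Spec_create_atbash_table_py alphabet (create_atbash_table_py alphabet)

-- ===== LEMMAS AND PROOFS =====

-- A's modular index, as a plain difference, split by j < i
lemma mod_index_eq (n i j : Nat) (hi : i < n) (hj : j < n) :
    PySem.Int.mod ((n : Int) - 1 - (j : Int) + (i : Int)) (n : Int)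
      = if j < i then ((i : Int) - 1 - (j : Int)) else ((n : Int) - 1 - (j : Int) + (i : Int)) := by
  rw [PySem.Int.mod_eq_emod_of_pos (by omega)]
  split_ifs with h
  · rw [show ((n : Int) - 1 - (j:Int) + (i:Int)) = ((i:Int) - 1 - (j:Int)) + (n:Int) * 1 by ring,
      Int.add_mul_emod_self_left]
    exact Int.emod_eq_of_lt (by omega) (by omega)
  · exact Int.emod_eq_of_lt (by omega) (by omega)

-- rows agree: A's inner j-loop over the alphabet equals B's slice rotation of the reversed base row
lemma row_eq (l : List Char) (i : Nat) (hi : i < l.length) :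
    (List.range l.length).map (fun j : Nat =>
        match PySem.List.pyGet? l (PySem.Int.mod ((l.length : Int) - 1 - (j:Int) + (i:Int)) (l.length : Int)) with
        | some c => String.ofList [c] | none => "")
      = (l.reverse.map (fun c => String.ofList [c])).drop (l.length - i)
        ++ (l.reverse.map (fun c => String.ofList [c])).take (l.length - i) := by
  apply List.ext_getElem
  · simp
  · intro j hj1 hj2
    have hjn : j < l.length := by simpa using hj1
    simp only [List.getElem_map, List.getElem_range]
    rw [mod_index_eq l.length i j hi hjn]
    by_cases h : j < i
    · simp only [if_pos h]
      rw [show ((i : Int) - 1 - (j:Int)) = ((i - 1 - j : Nat) : Int) by omega,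
        PySem.List.pyGet?_natCast, List.getElem?_eq_getElem (by omega : i - 1 - j < l.length)]
      rw [List.getElem_append_left (by simp; omega)]
      rw [List.getElem_drop, List.getElem_map, List.getElem_reverse]
      have he : l.length - 1 - (l.length - i + j) = i - 1 - j := by omega
      simp [he]
    · simp only [if_neg h]
      rw [show ((l.length : Int) - 1 - (j:Int) + (i:Int)) = ((l.length - 1 - j + i : Nat) : Int) by omega,
        PySem.List.pyGet?_natCast, List.getElem?_eq_getElem (by omega : l.length - 1 - j + i < l.length)]
      rw [List.getElem_append_right (by simp; omega)]
      rw [List.getElem_take, List.getElem_map, List.getElem_reverse]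
      have he : l.length - 1 - (j - (l.length - (l.length - i))) = l.length - 1 - j + i := by omega
      simp [he]

-- ===== VERDICT (by name: the statement is the Claim_ definition above) =====
theorem create_atbash_table_py_spec : Claim_equal_create_atbash_table_py := by
  intro alphabet _
  unfold Spec_create_atbash_table_py create_atbash_table_py create_atbash_table_py_alt
  obtain ⟨l, rfl⟩ : ∃ l, alphabet = String.ofList l := ⟨alphabet.toList, by simp⟩
  have hlen : PySem.Str.len (String.ofList l) = (l.length : Int) := by simp
  simp only [hlen, String.toList_ofList, List.length_map, List.length_reverse,
    PySem.List.pyRange_zero_natCast, PySem.List.foldl_append_singleton_eq_map, List.nil_append]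
  apply List.map_congr_left
  intro x hx
  simp only [List.mem_map, List.mem_range] at hx
  obtain ⟨k, hk, rfl⟩ := hx
  rw [List.map_map]
  have hs1 : PySem.List.slice (l.reverse.map (fun c => String.ofList [c])) (some ((l.length : Int) - (k:Int))) none
      = (l.reverse.map (fun c => String.ofList [c])).drop (l.length - k) := by
    rw [PySem.List.slice_from _ (by omega : (0:Int) ≤ (l.length : Int) - (k:Int))]
    congr 1; omega
  have hs2 : PySem.List.slice (l.reverse.map (fun c => String.ofList [c])) none (some ((l.length : Int) - (k:Int)))
      = (l.reverse.map (fun c => String.ofList [c])).take (l.length - k) := by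
    rw [PySem.List.slice_to _ (by omega : (0:Int) ≤ (l.length : Int) - (k:Int))]
    congr 1; omega
  rw [hs1, hs2]
  simpa using row_eq l k hk
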